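-- pv_equiv track=rewrite | github.com/realmarcin/cluewrite | scripts/rrwrite_edit_applicators.py | _find_insert_point
-- ===== SOURCE A (Python) =====
-- from typing import List, Dict, Optional, Tuple
--
-- def _find_insert_point(content: str, location: Dict) -> int:
--     """Find insertion point based on target location."""
--     if 'paragraph_index' in location:
--         paragraphs = content.split('\n\n')
--         idx = location['paragraph_index']
--         if idx < len(paragraphs):
--             # Find character position of paragraph
--             pos = 0
--             for i in range(idx):
--                 pos += len(paragraphs[i]) + 2  # +2 for \n\n
--             return pos
--
--     # Default: end of file
--     return len(content)
-- ===== SOURCE B (Python) =====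
-- def _find_insert_point(content, location):
--     """Find insertion point based on target location."""
--     if 'paragraph_index' not in location:
--         return len(content)
--     idx = location['paragraph_index']
--     if idx <= 0:
--         return 0
--     # single left-to-right scan for '\n\n' separators, no split list built
--     i = 0
--     n = len(content)
--     while i < n:
--         if content.startswith('\n\n', i):
--             idx -= 1
--             i += 2
--             if idx == 0:
--                 return i
--         else:
--             i += 1
--     return n
-- ===== Notes on version B (the rewrite author's own statement) =====
-- stated objective: alternative
-- what changed: Instead of splitting the text into a list of paragraphs and summing the lengths of the first idx pieces, B makes a single left-to-right scan of the text, counting '\n\n' separators and returning the offset after the idx-th one (default len(content) as in A).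
import Mathlib
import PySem

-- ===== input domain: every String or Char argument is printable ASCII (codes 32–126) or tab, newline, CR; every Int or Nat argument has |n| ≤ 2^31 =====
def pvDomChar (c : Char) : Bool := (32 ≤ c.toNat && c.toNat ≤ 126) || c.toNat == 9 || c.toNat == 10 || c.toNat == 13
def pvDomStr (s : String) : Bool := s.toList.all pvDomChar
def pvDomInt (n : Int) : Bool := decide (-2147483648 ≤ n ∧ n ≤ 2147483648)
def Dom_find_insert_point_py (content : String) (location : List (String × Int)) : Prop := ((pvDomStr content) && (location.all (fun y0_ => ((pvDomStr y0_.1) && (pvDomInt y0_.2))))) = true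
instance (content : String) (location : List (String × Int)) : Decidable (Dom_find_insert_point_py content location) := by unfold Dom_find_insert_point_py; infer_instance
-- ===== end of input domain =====

-- B replaces 'split into a list and sum the first idx piece lengths' by one direct
-- left-to-right scan of the text for '\n\n' separators (objective: alternative; no list of pieces is built).

-- ===== PORT A =====
-- A: paragraphs = content.split('\n\n'); if idx < len(paragraphs): pos = Σ_{i<idx} (len(paragraphs[i]) + 2); default len(content)
def find_insert_point_py (content : String) (location : List (String × Int)) : Int :=
  match (PySem.Dict.mk location).get? "paragraph_index" with
  | some idx =>
      let paragraphs := PySem.Chars.splitOn content.toList ['\n', '\n']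
      if idx < (paragraphs.length : Int) then
        (PySem.List.pyRange 0 idx 1).foldl
          (fun pos i => pos + ((PySem.List.pyGetD paragraphs i ([] : List Char)).length : Int) + 2) 0
      else (PySem.Str.len content : Int)
  | none => (PySem.Str.len content : Int)

-- ===== PORT B =====
-- B's scan loop: walk the remaining characters, i = chars consumed so far, k = separators still to pass
def pvScanB (n : Int) : List Char → Int → Int → Int
  | [], _, _ => n
  | c :: rest, k, i =>
    if ['\n', '\n'].isPrefixOf (c :: rest) then      -- content.startswith('\n\n', i)
      if k - 1 = 0 then i + 2
      else pvScanB n ((c :: rest).drop 2) (k - 1) (i + 2)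
    else pvScanB n rest k (i + 1)
termination_by l => l.length
decreasing_by · simp only [List.length_drop, List.length_cons]; omega
              · simp

def find_insert_point_py_alt (content : String) (location : List (String × Int)) : Int :=
  match (PySem.Dict.mk location).get? "paragraph_index" with
  | some idx =>
      if idx ≤ 0 then 0
      else pvScanB (PySem.Str.len content : Int) content.toList idx 0
  | none => (PySem.Str.len content : Int)

-- ===== PRECONDITION & SPEC =====
def Spec_find_insert_point_py (content : String) (location : List (String × Int)) (out : Int) : Prop := out = find_insert_point_py_alt content location
instance (content : String) (location : List (String × Int)) (out : Int) : Decidable (Spec_find_insert_point_py content location out) := by unfold Spec_find_insert_point_py; infer_instance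

-- ===== CLAIM (what is proved, stated in full; the proofs are below) =====
def Claim_equal_find_insert_point_py : Prop := ∀ (content : String) (location : List (String × Int)), Dom_find_insert_point_py content location → Spec_find_insert_point_py content location (find_insert_point_py content location)

-- ===== LEMMAS AND PROOFS =====

-- structural reference form of content.split('\n\n') on the character list
def pvSplit : List Char → List (List Char)
  | [] => [[]]
  | c :: rest =>
    if ['\n', '\n'].isPrefixOf (c :: rest) then [] :: pvSplit ((c :: rest).drop 2)
    else (pvSplit rest).modifyHead (c :: ·)
termination_by l => l.length
decreasing_by · simp only [List.length_drop, List.length_cons]; omega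
              · simp

theorem pvSplit_ne_nil (l : List Char) : pvSplit l ≠ [] := by
  induction l using pvSplit.induct with
  | case1 => simp [pvSplit]
  | case2 c rest h ih => simp [pvSplit, h]
  | case3 c rest h ih =>
    simp only [pvSplit, h, Bool.false_eq_true, if_false]
    cases hp : pvSplit rest <;> simp_all

theorem pvSplitOn_go_eq (fuel : Nat) : ∀ (l cur : List Char) (acc : List (List Char)), l.length < fuel →
    PySem.Chars.splitOn.go ['\n', '\n'] fuel l cur acc
      = acc.reverse ++ (pvSplit l).modifyHead (cur.reverse ++ ·) := by
  induction fuel with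
  | zero => intro l cur acc h; omega
  | succ fuel ih =>
    intro l cur acc h
    match l with
    | [] => simp [PySem.Chars.splitOn.go, pvSplit]
    | c :: rest =>
      rw [PySem.Chars.splitOn.go]
      by_cases hp : ['\n', '\n'].isPrefixOf (c :: rest)
      · simp only [hp, if_true]
        rw [ih _ _ _ (by simp at h ⊢; omega)]
        simp only [pvSplit, hp, if_true, List.drop_succ_cons, List.drop_one]
        cases hr : pvSplit rest.tail <;> simp [hr]
      · simp only [hp, Bool.false_eq_true, if_false]
        rw [ih _ _ _ (by simp at h ⊢; omega)]
        simp only [pvSplit, hp, Bool.false_eq_true, if_false]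
        cases hr : pvSplit rest with
        | nil => exact absurd hr (pvSplit_ne_nil rest)
        | cons hd tl => simp

theorem pvSplitOn_eq_pvSplit (l : List Char) : PySem.Chars.splitOn l ['\n', '\n'] = pvSplit l := by
  rw [PySem.Chars.splitOn, pvSplitOn_go_eq (l.length + 1) l [] [] (by omega)]
  cases hr : pvSplit l with
  | nil => exact absurd hr (pvSplit_ne_nil l)
  | cons hd tl => simp

-- B's scan computes the same prefix sums as A's split-and-sum
theorem pvScanB_eq (n : Int) (l : List Char) : ∀ (k i : Int), 1 ≤ k →
    pvScanB n l k i
      = if k < ((pvSplit l).length : Int)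
        then i + (((pvSplit l).take k.toNat).map (fun p => (p.length : Int) + 2)).sum
        else n := by
  induction l using pvSplit.induct with
  | case1 =>
    intro k i hk
    have h1 : ¬ (k < ((pvSplit ([] : List Char)).length : Int)) := by simp [pvSplit]; omega
    simp [pvScanB, h1]
  | case2 c rest h ih =>
    intro k i hk
    simp only [pvScanB, h, if_true, pvSplit]
    by_cases h1 : k - 1 = 0
    · have hk1 : k = 1 := by omega
      subst hk1
      have hlen2 : (1 : Int) < (([] :: pvSplit ((c :: rest).drop 2)).length : Int) := by
        have := pvSplit_ne_nil ((c :: rest).drop 2)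
        cases hq : pvSplit ((c :: rest).drop 2) <;> simp_all
      rw [if_pos h1, if_pos hlen2]
      simp
    · simp only [h1, if_false]
      rw [ih _ _ (by omega)]
      have hnat : k.toNat = (k - 1).toNat + 1 := by omega
      rw [hnat]
      simp only [List.length_cons, List.take_succ_cons, List.map_cons, List.sum_cons,
        List.length_nil, Nat.cast_zero, Nat.cast_add, Nat.cast_one, zero_add]
      generalize (List.map (fun (p : List Char) => ((p.length : Int) + 2))
        (List.take (k - 1).toNat (pvSplit ((c :: rest).drop 2)))).sum = S
      split_ifs <;> omega
  | case3 c rest h ih =>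
    intro k i hk
    simp only [pvScanB, h, Bool.false_eq_true, if_false, pvSplit]
    rw [ih _ _ hk]
    cases hq : pvSplit rest with
    | nil => exact absurd hq (pvSplit_ne_nil rest)
    | cons q Q =>
      simp only [List.modifyHead_cons, List.length_cons]
      have hnat : k.toNat = (k.toNat - 1) + 1 := by omega
      rw [hnat]
      simp only [List.take_succ_cons, List.map_cons, List.sum_cons, List.length_cons,
        Nat.cast_add, Nat.cast_one]
      generalize (List.map (fun (p : List Char) => ((p.length : Int) + 2))
        (List.take (k.toNat - 1) Q)).sum = S
      split_ifs <;> omega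

-- A's range-indexed fold is the prefix sum over the split pieces
theorem pvFoldA (parts : List (List Char)) : ∀ (m : Nat), m ≤ parts.length →
    (PySem.List.pyRange 0 (m : Int) 1).foldl
        (fun pos i => pos + ((PySem.List.pyGetD parts i ([] : List Char)).length : Int) + 2) 0
      = ((parts.take m).map (fun p => (p.length : Int) + 2)).sum := by
  intro m
  induction m with
  | zero => intro _; simp [PySem.List.pyRange_one_eq_nil]
  | succ m ih =>
    intro hm
    have hm' : m < parts.length := by omega
    have hcast : ((m + 1 : Nat) : Int) = (m : Int) + 1 := by push_cast; ring
    rw [hcast, PySem.List.pyRange_one_succ_right (by positivity), List.foldl_append,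
      ih (by omega)]
    simp only [List.foldl_cons, List.foldl_nil]
    have hget : PySem.List.pyGetD parts (m : Int) ([] : List Char) = parts[m] := by
      rw [PySem.List.pyGetD_natCast, List.getD_eq_getElem parts ([] : List Char) hm']
    rw [hget, List.map_take, List.map_take,
      List.sum_take_succ _ m (by simpa using hm'), List.getElem_map]
    ring

-- ===== VERDICT (by name: the statement is the Claim_ definition above) =====
theorem find_insert_point_py_spec : Claim_equal_find_insert_point_py := by
  intro content location _hdom
  unfold Spec_find_insert_point_py find_insert_point_py find_insert_point_py_alt
  cases hidx : (PySem.Dict.mk location).get? "paragraph_index" with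
  | none => simp
  | some idx =>
    simp only [pvSplitOn_eq_pvSplit]
    have hne := pvSplit_ne_nil content.toList
    have hlen : 1 ≤ (pvSplit content.toList).length := by
      cases hq : pvSplit content.toList <;> simp_all
    by_cases hk : idx ≤ 0
    · have h1 : idx < ((pvSplit content.toList).length : Int) := by omega
      have h2 : PySem.List.pyRange 0 idx 1 = [] := PySem.List.pyRange_one_eq_nil (by omega)
      rw [if_pos h1, if_pos hk, h2]
      simp
    · have hk1 : (1 : Int) ≤ idx := by omega
      rw [if_neg hk, pvScanB_eq _ _ _ _ hk1]
      by_cases h1 : idx < ((pvSplit content.toList).length : Int)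
      · rw [if_pos h1, if_pos h1]
        have hmn : ((idx.toNat : Nat) : Int) = idx := by omega
        rw [← hmn]
        rw [pvFoldA (pvSplit content.toList) idx.toNat (by omega), zero_add,
          Int.toNat_natCast]
      · rw [if_neg h1, if_neg h1]
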